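-- pv_equiv track=rewrite | github.com/jinho7/CodingTest_Python-Java | 프로그래머스/2/131704. 택배상자/택배상자.py | solution
-- ===== SOURCE A (Python) =====
-- def solution(order):
--     answer = 0
--     temp = []
--     origin = [i for i in range(len(order), 0, -1)]
--     idx = 0
--     # order 에 있는 순서대로 들어가야함
--     while idx < len(order):
--         # order[idx]가 origin의 마지막 상자와 일치
--         if len(origin) > 0 and order[idx] == origin[-1]:
--             origin.pop()
--             answer += 1
--             idx += 1
--         # order[idx]가 temp의 맨 위 상자와 일치
--         elif len(temp) > 0 and order[idx] == temp[-1]: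
--             temp.pop()
--             answer += 1
--             idx += 1
--         # origin에서 상자를 꺼내 temp에 임시 보관
--         else:
--             if len(origin) > 0:
--                 temp.append(origin.pop())
--             else:
--                 break
--
--     return answer
-- ===== SOURCE B (Python) =====
-- def solution(order):
--     # Interval-stack simulation: the side stack is always increasing, so it is a
--     # union of disjoint ranges; keep a stack of pending (lo, hi) half-open
--     # intervals instead of individual boxes.
--     n = len(order)
--     i = 1            # next box on the conveyor
--     ivs = []         # pending intervals (lo, hi), hi exclusive, lo < hi; last = topmost
--     answer = 0
--     for x in order:
--         if i <= x <= n: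
--             # deliver x straight off the conveyor, boxes i..x-1 become pending
--             if i < x:
--                 ivs.append((i, x))
--             i = x + 1
--             answer += 1
--         elif ivs and x == ivs[-1][1] - 1:
--             # x is the top pending box: deliver it from the side stack
--             lo, hi = ivs[-1]
--             if hi - 1 == lo:
--                 ivs.pop()
--             else:
--                 ivs[-1] = (lo, hi - 1)
--             answer += 1
--         else:
--             break
--     return answer
-- ===== Notes on version B (the rewrite author's own statement) =====
-- stated objective: faster
-- what changed: B drops the box-by-box two-stack simulation: since A's side stack is always increasing, B records pending boxes as a stack of (lo,hi) intervals, delivering straight off the conveyor via a counter and recording a whole skipped range in O(1) instead of pushing and later popping each box individually (a constant-factor/amortized win, large when ranges are long).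
import Mathlib
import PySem

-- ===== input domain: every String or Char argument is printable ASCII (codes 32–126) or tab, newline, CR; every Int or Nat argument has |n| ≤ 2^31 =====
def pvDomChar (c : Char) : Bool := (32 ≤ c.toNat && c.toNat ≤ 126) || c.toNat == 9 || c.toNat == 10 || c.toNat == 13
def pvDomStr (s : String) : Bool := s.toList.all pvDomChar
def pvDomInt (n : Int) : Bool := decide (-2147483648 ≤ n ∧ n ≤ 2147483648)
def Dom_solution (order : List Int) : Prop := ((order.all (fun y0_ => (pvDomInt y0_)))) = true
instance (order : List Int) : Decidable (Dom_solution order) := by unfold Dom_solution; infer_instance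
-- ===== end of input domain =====

-- B replaces A's box-by-box two-stack simulation by a stack of pending (lo,hi) intervals
-- (the side stack is always increasing, hence a union of ranges): an alternative algorithm.

-- ===== PORT A =====
-- A's while-loop; both Python stacks keep their top at the END of the list, here the top is
-- kept at the HEAD (origin/temp are the Python lists reversed); pops/appends act on the head.
def loopA (order : List Int) (idx : Nat) (origin temp : List Int) (answer : Int) : Int :=
  if h : idx < order.length then
    if origin.head? = some order[idx] then          -- len(origin)>0 and order[idx]==origin[-1]
      loopA order (idx + 1) origin.tail temp (answer + 1)
    else if temp.head? = some order[idx] then       -- len(temp)>0 and order[idx]==temp[-1]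
      loopA order (idx + 1) origin temp.tail (answer + 1)
    else
      match origin with
      | o :: os => loopA order idx os (o :: temp) answer  -- temp.append(origin.pop())
      | [] => answer                                       -- break
  else answer
termination_by 2 * (order.length - idx) + 2 * origin.length + temp.length
decreasing_by
  · simp only [List.length_tail]; omega
  · simp only [List.length_tail]; omega
  · simp only [List.length_cons]; omega

def solution (order : List Int) : Int :=
  -- origin = [i for i in range(len(order), 0, -1)], reversed since the top is kept at the head
  loopA order 0 ((PySem.List.pyRange (order.length : Int) 0 (-1)).reverse) [] 0

-- ===== PORT B =====
-- for x in order: deliver from the conveyor (recording the skipped range as a pending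
-- interval) or shrink/pop the top pending interval, else break; Python's list keeps the
-- topmost interval LAST, so appends/pops act on the tail here too.
def loopB (n : Int) (l : List Int) (i : Int) (ivs : List (Int × Int)) (answer : Int) : Int :=
  match l with
  | [] => answer
  | x :: xs =>
    if i ≤ x ∧ x ≤ n then
      loopB n xs (x + 1) (if i < x then ivs ++ [(i, x)] else ivs) (answer + 1)
    else
      match ivs.getLast? with
      | some (lo, hi) =>
        if x = hi - 1 then
          loopB n xs i (if hi - 1 = lo then ivs.dropLast else ivs.dropLast ++ [(lo, hi - 1)]) (answer + 1)
        else answer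
      | none => answer

def solution_alt (order : List Int) : Int :=
  loopB (order.length : Int) order 1 [] 0

-- ===== PRECONDITION & SPEC =====
def Spec_solution (order : List Int) (out : Int) : Prop := out = solution_alt order
instance (order : List Int) (out : Int) : Decidable (Spec_solution order out) := by unfold Spec_solution; infer_instance

-- ===== CLAIM (what is proved, stated in full; the proofs are below) =====
def Claim_equal_solution : Prop := ∀ (order : List Int), Dom_solution order → Spec_solution order (solution order)

-- ===== LEMMAS AND PROOFS =====

-- A's temp stack (top at head) corresponding to B's interval stack
def flat (ivs : List (Int × Int)) : List Int :=
  ivs.foldl (fun acc p => (PySem.List.pyRange p.1 p.2 1).reverse ++ acc) []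

lemma foldl_flat_mem (ivs : List (Int × Int)) : ∀ (acc : List Int) (t : Int),
    t ∈ ivs.foldl (fun acc p => (PySem.List.pyRange p.1 p.2 1).reverse ++ acc) acc →
    t ∈ acc ∨ ∃ p ∈ ivs, p.1 ≤ t ∧ t < p.2 := by
  induction ivs with
  | nil => intro acc t h; exact Or.inl h
  | cons q rest ih =>
    intro acc t h
    rcases ih _ t h with h' | ⟨p, hp, hb⟩
    · rcases List.mem_append.mp h' with h'' | h''
      · right
        refine ⟨q, List.mem_cons_self, ?_⟩
        have := (PySem.List.mem_pyRange_one).mp (List.mem_reverse.mp h'')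
        exact this
      · exact Or.inl h''
    · exact Or.inr ⟨p, List.mem_cons_of_mem _ hp, hb⟩

lemma flat_lt (ivs : List (Int × Int)) (i : Int)
    (h : ∀ p ∈ ivs, p.1 < p.2 ∧ p.2 ≤ i) :
    ∀ t ∈ flat ivs, t < i := by
  intro t ht
  rcases foldl_flat_mem ivs [] t ht with h' | ⟨p, hp, hb⟩
  · simp at h'
  · have := h p hp; omega

lemma flat_append (ivs : List (Int × Int)) (a b : Int) :
    flat (ivs ++ [(a, b)]) = (PySem.List.pyRange a b 1).reverse ++ flat ivs := by
  simp [flat, List.foldl_append]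

lemma desc_cons (lo m : Int) (h : lo ≤ m) :
    (PySem.List.pyRange lo (m + 1) 1).reverse = m :: (PySem.List.pyRange lo m 1).reverse := by
  rw [PySem.List.pyRange_one_succ_right h]; simp

-- A delivers x straight off the conveyor after moving i..x-1 onto temp
lemma pushA (order : List Int) : ∀ (k : Nat) (idx : Nat) (i x : Int) (temp : List Int) (ans : Int)
    (h : idx < order.length), order[idx] = x → i ≤ x → x ≤ (order.length : Int) →
    (∀ t ∈ temp, t < i) → (x - i).toNat = k →
    loopA order idx (PySem.List.pyRange i ((order.length : Int) + 1) 1) temp ans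
      = loopA order (idx + 1) (PySem.List.pyRange (x + 1) ((order.length : Int) + 1) 1)
          ((PySem.List.pyRange i x 1).reverse ++ temp) (ans + 1) := by
  intro k
  induction k with
  | zero =>
    intro idx i x temp ans h hx hix hxN htemp hk
    have hxi : x = i := by omega
    rw [loopA.eq_def]
    have hr : PySem.List.pyRange i ((order.length : Int) + 1) 1
        = i :: PySem.List.pyRange (i + 1) ((order.length : Int) + 1) 1 :=
      PySem.List.pyRange_one_cons (by omega)
    simp only [dif_pos h, hr, List.head?_cons, hx]
    rw [if_pos (by rw [hxi])]
    rw [PySem.List.pyRange_one_eq_nil (by omega : x ≤ i)]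
    simp [hxi]
  | succ k ih =>
    intro idx i x temp ans h hx hix hxN htemp hk
    have hlt : i < x := by omega
    rw [loopA.eq_def]
    have hr : PySem.List.pyRange i ((order.length : Int) + 1) 1
        = i :: PySem.List.pyRange (i + 1) ((order.length : Int) + 1) 1 :=
      PySem.List.pyRange_one_cons (by omega)
    simp only [dif_pos h, hr, List.head?_cons, hx]
    rw [if_neg (by intro hc; simp at hc; omega)]
    rw [if_neg (by
      cases temp with
      | nil => simp
      | cons t ts =>
        simp only [List.head?_cons, Option.some.injEq]
        have := htemp t List.mem_cons_self; omega)]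
    rw [ih idx (i + 1) x (i :: temp) ans h hx (by omega) hxN
      (by intro t ht; rcases List.mem_cons.mp ht with h' | h'
          · omega
          · have := htemp t h'; omega) (by omega)]
    rw [PySem.List.pyRange_one_cons hlt]
    simp

-- A pushes the whole conveyor onto temp and breaks
lemma breakA (order : List Int) : ∀ (k : Nat) (idx : Nat) (j x : Int) (temp : List Int) (ans : Int)
    (h : idx < order.length), order[idx] = x → (x < j ∨ (order.length : Int) < x) →
    temp.head? ≠ some x → (((order.length : Int) + 1) - j).toNat = k →
    loopA order idx (PySem.List.pyRange j ((order.length : Int) + 1) 1) temp ans = ans := by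
  intro k
  induction k with
  | zero =>
    intro idx j x temp ans h hx hcond hhead hk
    have hj : (order.length : Int) + 1 ≤ j := by omega
    rw [loopA.eq_def]
    simp only [dif_pos h, PySem.List.pyRange_one_eq_nil hj, List.head?_nil, hx]
    rw [if_neg (by simp)]
    rw [if_neg hhead]
  | succ k ih =>
    intro idx j x temp ans h hx hcond hhead hk
    by_cases hj : j ≤ (order.length : Int)
    · rw [loopA.eq_def]
      have hr : PySem.List.pyRange j ((order.length : Int) + 1) 1
          = j :: PySem.List.pyRange (j + 1) ((order.length : Int) + 1) 1 :=
        PySem.List.pyRange_one_cons (by omega)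
      simp only [dif_pos h, hr, List.head?_cons, hx]
      rw [if_neg (by intro hc; simp at hc; omega)]
      rw [if_neg hhead]
      have hjx : j ≠ x := by omega
      exact ih idx (j + 1) x (j :: temp) ans h hx (by omega)
        (by simp [hjx]) (by omega)
    · rw [loopA.eq_def]
      simp only [dif_pos h, PySem.List.pyRange_one_eq_nil (by omega : (order.length : Int) + 1 ≤ j),
        List.head?_nil, hx]
      rw [if_neg (by simp)]
      rw [if_neg hhead]

lemma main (order : List Int) : ∀ (M : Nat) (idx : Nat) (i : Int) (ivs : List (Int × Int)) (ans : Int),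
    order.length - idx ≤ M → 1 ≤ i → i ≤ (order.length : Int) + 1 →
    (∀ p ∈ ivs, p.1 < p.2 ∧ p.2 ≤ i) →
    loopA order idx (PySem.List.pyRange i ((order.length : Int) + 1) 1) (flat ivs) ans
      = loopB (order.length : Int) (order.drop idx) i ivs ans := by
  intro M
  induction M with
  | zero =>
    intro idx i ivs ans hM h1 h2 hinv
    have hidx : order.length ≤ idx := by omega
    rw [loopA.eq_def]
    simp only [dif_neg (by omega : ¬ idx < order.length)]
    rw [List.drop_eq_nil_of_le hidx, loopB]
  | succ M ih =>
    intro idx i ivs ans hM h1 h2 hinv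
    by_cases hidx : idx < order.length
    · have hdrop : order.drop idx = order[idx] :: order.drop (idx + 1) :=
        List.drop_eq_getElem_cons hidx
      set x := order[idx] with hxdef
      by_cases hc : i ≤ x ∧ x ≤ (order.length : Int)
      · -- B delivers off the conveyor; A after (x-i) pushes hits the origin top
        rw [pushA order (x - i).toNat idx i x (flat ivs) ans hidx rfl hc.1 hc.2
          (flat_lt ivs i hinv) rfl]
        have hflat : (PySem.List.pyRange i x 1).reverse ++ flat ivs
            = flat (if i < x then ivs ++ [(i, x)] else ivs) := by
          by_cases hlt : i < x
          · rw [if_pos hlt, flat_append]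
          · rw [if_neg hlt, PySem.List.pyRange_one_eq_nil (by omega)]; simp
        rw [hflat]
        rw [ih (idx + 1) (x + 1) _ (ans + 1) (by omega) (by omega) (by omega)
          (by
            intro p hp
            by_cases hlt : i < x
            · rw [if_pos hlt] at hp
              rcases List.mem_append.mp hp with h' | h'
              · have := hinv p h'; omega
              · rw [List.mem_singleton] at h'; rw [h']; exact ⟨hlt, by omega⟩
            · rw [if_neg hlt] at hp; have := hinv p hp; omega)]
        rw [hdrop, loopB, if_pos hc]
      · cases hiv : ivs.getLast? with
        | none =>
          have hnil : ivs = [] := List.getLast?_eq_none_iff.mp hiv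
          rw [breakA order ((order.length : Int) + 1 - i).toNat idx i x (flat ivs) ans hidx rfl
            (by omega) (by rw [hnil]; simp [flat]) rfl]
          rw [hdrop, loopB, if_neg hc, hiv]
        | some p =>
          obtain ⟨lo, hi⟩ := p
          have hne : ivs ≠ [] := by intro hn; rw [hn] at hiv; simp at hiv
          have hsp : ivs = ivs.dropLast ++ [(lo, hi)] := by
            have h1' := List.dropLast_append_getLast hne
            rw [List.getLast?_eq_some_getLast hne] at hiv
            simp only [Option.some.injEq] at hiv
            rw [hiv] at h1'
            exact h1'.symm
          have hmem : (lo, hi) ∈ ivs := by rw [hsp]; simp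
          have hbnd := hinv _ hmem
          have hdesc : (PySem.List.pyRange lo hi 1).reverse
              = (hi - 1) :: (PySem.List.pyRange lo (hi - 1) 1).reverse := by
            have e := desc_cons lo (hi - 1) (by omega)
            have h2' : hi - 1 + 1 = hi := by omega
            rw [h2'] at e
            exact e
          have hflat : flat ivs = (hi - 1) :: ((PySem.List.pyRange lo (hi - 1) 1).reverse ++ flat ivs.dropLast) := by
            conv_lhs => rw [hsp]
            rw [flat_append, hdesc]
            simp
          by_cases hx2 : x = hi - 1
          · -- pop the top pending box
            rw [loopA.eq_def]
            simp only [dif_pos hidx, ← hxdef]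
            rw [if_neg (by
              by_cases hiN : i ≤ (order.length : Int)
              · rw [PySem.List.pyRange_one_cons (by omega : i < (order.length : Int) + 1)]
                simp only [List.head?_cons, Option.some.injEq]
                intro hc'; omega
              · rw [PySem.List.pyRange_one_eq_nil (by omega)]; simp)]
            rw [if_pos (by rw [hflat]; simp [hx2])]
            have htail : (flat ivs).tail
                = flat (if hi - 1 = lo then ivs.dropLast else ivs.dropLast ++ [(lo, hi - 1)]) := by
              rw [hflat]
              simp only [List.tail_cons]
              by_cases heq : hi - 1 = lo
              · rw [if_pos heq, heq, PySem.List.pyRange_one_eq_nil (by omega)]; simp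
              · rw [if_neg heq, flat_append]
            rw [htail]
            rw [ih (idx + 1) i _ (ans + 1) (by omega) h1 h2
              (by
                intro p hp
                by_cases heq : hi - 1 = lo
                · rw [if_pos heq] at hp
                  exact hinv p (List.mem_of_mem_dropLast hp)
                · rw [if_neg heq] at hp
                  rcases List.mem_append.mp hp with h' | h'
                  · exact hinv p (List.mem_of_mem_dropLast h')
                  · rw [List.mem_singleton] at h'; rw [h']; exact ⟨by omega, by omega⟩)]
            rw [hdrop, loopB, if_neg hc, hiv]; simp [hx2]
          · -- no match: both sides break
            rw [breakA order ((order.length : Int) + 1 - i).toNat idx i x (flat ivs) ans hidx rfl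
              (by omega) (by rw [hflat]; intro hc'; simp at hc'; omega) rfl]
            rw [hdrop, loopB, if_neg hc, hiv]; simp [hx2]
    · rw [loopA.eq_def]
      simp only [dif_neg hidx]
      rw [List.drop_eq_nil_of_le (by omega), loopB]

-- ===== VERDICT (by name: the statement is the Claim_ definition above) =====
theorem solution_spec : Claim_equal_solution := by
  intro order _
  show solution order = solution_alt order
  unfold solution solution_alt
  rw [PySem.List.pyRange_neg_one_eq_reverse, List.reverse_reverse]
  have h0 : ((0 : Int) + 1) = 1 := by norm_num
  rw [h0]
  have := main order order.length 0 1 [] 0 (by omega) (by omega) (by omega) (by simp)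
  simpa [flat] using this
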